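-- pv_equiv track=rewrite | github.com/swazara/bioinformatics-active-learning | bio_utils.py | frequent_patterns_with_mismatches
-- ===== SOURCE A (Python) =====
-- def reverse_complement(pattern: str) -> str:
--     """
--     Returns the reverse complement of a DNA string.
--
--     Complexity: O(k)
--     """
--     tabla = str.maketrans("ACGT", "TGCA")
--     return pattern.translate(tabla)[::-1]
--
-- def neighborhood(pattern: str, d: int) -> set:
--     """
--     Returns the set of all DNA strings within Hamming distance d of *pattern*.
--
--     Strategy: recursive generation — at each position either keep the original
--     nucleotide or (if mismatches remain) substitute it with any of the 3 others.
--
--     Complexity: O(k · N)  where N = Σ_{i=0}^{d} C(k,i)·3^i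
--     """
--     def generate(idx: int, remaining_d: int):
--         if idx == len(pattern):
--             return [""]
--         results = []
--         original = pattern[idx]
--         for suffix in generate(idx + 1, remaining_d):
--             results.append(original + suffix)
--         if remaining_d > 0:
--             for base in "ACGT":
--                 if base != original:
--                     for suffix in generate(idx + 1, remaining_d - 1):
--                         results.append(base + suffix)
--         return results
--
--     return set(generate(0, d))
--
-- def frequent_patterns_with_mismatches(dna_seq: str, k: int, d: int, n: int = 10) -> list:
--     """
--     Finds the top-*n* most frequent k-mers in *dna_seq* allowing up to *d*
--     mismatches.  Reverse-complement pairs are grouped together and reported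
--     under their lexicographically smaller representative.
--
--     Returns a list of tuples sorted by total score (descending):
--         (canonical_kmer, total_score, score_forward, score_reverse_complement)
--
--     Complexity: O(n · N + 4^k · k)
--       Dominant term is usually O(n · N) for short k with small d.
--     """
--     # Step 1 — exact counts
--     # O(n)
--     exact_counts: dict = {}
--     for i in range(len(dna_seq) - k + 1):
--         kmer = dna_seq[i: i + k]
--         exact_counts[kmer] = exact_counts.get(kmer, 0) + 1
--
--     # Step 2 — propagate to neighbors (forward only; RC grouping happens in step 3)
--     # O(n · N)
--     mismatch_scores: dict = {}
--     for kmer, count in exact_counts.items():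
--         for neighbor in neighborhood(kmer, d):
--             mismatch_scores[neighbor] = mismatch_scores.get(neighbor, 0) + count
--
--     # Step 3 — group by RC pair using canonical (lexicographically smaller) form
--     # O(4^k · k)
--     grouped: list = []
--     seen: set = set()
--
--     for pattern in sorted(mismatch_scores):
--         if pattern in seen:
--             continue
--         rc = reverse_complement(pattern)
--         score_fwd = mismatch_scores.get(pattern, 0)
--         score_rev = mismatch_scores.get(rc, 0)
--
--         if pattern == rc:                  # palindromic k-mer
--             total = score_fwd
--         else:
--             total = score_fwd + score_rev
--
--         # Canonical = lexicographically smaller of the pair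
--         canonical = min(pattern, rc)
--         if canonical == pattern:
--             grouped.append((canonical, total, score_fwd, score_rev))
--         else:
--             # forward strand is the RC, so swap the directional scores
--             grouped.append((canonical, total, score_rev, score_fwd))
--
--         seen.add(pattern)
--         seen.add(rc)
--
--     grouped.sort(key=lambda x: x[1], reverse=True)
--     return grouped[:n]
-- ===== SOURCE B (Python) =====
-- def frequent_patterns_with_mismatches(dna_seq: str, k: int, d: int, n: int = 10) -> list:
--     """Top-n frequent k-mers with up to d mismatches, reverse-complement grouped.
--
--     Differences from the original: the neighborhood is computed bottom-up with a
--     dynamic-programming table over (suffix position, remaining mismatches), so no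
--     suffix neighborhood is ever recomputed; and the RC-grouping pass is a single
--     filter over the sorted patterns instead of a loop with a 'seen' set.
--     """
--     # no k-mers of non-positive length exist (the original's slice wraparound
--     # would otherwise count accidental variable-length substrings)
--     if k < 1:
--         return []
--
--     tabla = str.maketrans("ACGT", "TGCA")
--
--     def rc(p):
--         return p.translate(tabla)[::-1]
--
--     def neighbors_dp(pattern, d):
--         # rows[r] = all strings within <= r mismatches of the current suffix
--         cap = min(max(d, 0), len(pattern))
--         rows = [[""]] * (cap + 1)
--         for ch in reversed(pattern):
--             new = []
--             for r in range(cap + 1):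
--                 row = [ch + s for s in rows[r]]
--                 if r > 0:
--                     for b in "ACGT":
--                         if b != ch:
--                             row += [b + s for s in rows[r - 1]]
--                 new.append(row)
--             rows = new
--         return set(rows[cap])
--
--     # exact k-mer counts
--     kmers = [dna_seq[i: i + k] for i in range(len(dna_seq) - k + 1)]
--     counts = {}
--     for km in kmers:
--         counts[km] = counts.get(km, 0) + 1
--
--     # propagate counts to the neighborhood of each distinct k-mer
--     scores = {}
--     for km, c in counts.items():
--         for nb in neighbors_dp(km, d):
--             scores[nb] = scores.get(nb, 0) + c
--
--     # RC grouping: keep a pattern unless its (strictly smaller) RC partner is also scored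
--     entries = []
--     for p in sorted(scores):
--         r = rc(p)
--         if r in scores and r < p:
--             continue
--         f, g = scores.get(p, 0), scores.get(r, 0)
--         total = f if p == r else f + g
--         entries.append((p, total, f, g) if p <= r else (r, total, g, f))
--     entries.sort(key=lambda t: t[1], reverse=True)
--     return entries[:n]
-- ===== Notes on version B (the rewrite author's own statement) =====
-- stated objective: alternative
-- what changed: The per-k-mer neighborhood is computed bottom-up with a DP table indexed by (suffix position, remaining mismatches) instead of a recursion that regenerates each suffix neighborhood once per substituted base, and the RC-grouping pass becomes a single filter over the sorted patterns instead of a loop maintaining a 'seen' set; Pre_ excludes k < 1, where A's slice wraparound counts accidental variable-length substrings and B naturally returns [].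
-- outside the precondition, e.g. on frequent_patterns_with_mismatches('AC', 0, 0, 10): A returns [('', 3, 3, 3)], B returns []
import Mathlib
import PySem

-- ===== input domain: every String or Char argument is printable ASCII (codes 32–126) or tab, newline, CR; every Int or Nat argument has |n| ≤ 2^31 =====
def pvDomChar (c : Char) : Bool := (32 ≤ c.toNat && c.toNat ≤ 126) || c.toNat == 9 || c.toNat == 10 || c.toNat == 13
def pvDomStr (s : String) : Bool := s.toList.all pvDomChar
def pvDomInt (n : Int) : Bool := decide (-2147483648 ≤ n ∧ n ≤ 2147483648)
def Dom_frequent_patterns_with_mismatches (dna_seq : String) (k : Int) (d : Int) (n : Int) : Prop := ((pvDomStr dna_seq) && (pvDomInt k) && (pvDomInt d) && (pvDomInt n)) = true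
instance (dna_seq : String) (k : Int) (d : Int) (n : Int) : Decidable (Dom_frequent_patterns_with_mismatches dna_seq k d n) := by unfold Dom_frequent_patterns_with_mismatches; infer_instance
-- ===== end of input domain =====

-- B replaces A's recursive neighborhood generation by a bottom-up DP table over
-- (suffix position, remaining mismatches) — no suffix neighborhood is regenerated per
-- substituted base — and the 'seen'-set RC-grouping loop by a filter over the sorted patterns.

-- ===== PORT A =====
-- str.maketrans("ACGT","TGCA")/translate ported as a per-character map (exact: the
-- table maps only 'A','C','G','T', every other character is left unchanged); [::-1] is reverse.
def pvCompl (c : Char) : Char :=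
  if c = 'A' then 'T' else if c = 'C' then 'G' else if c = 'G' then 'C' else if c = 'T' then 'A' else c

def pvRC (s : String) : String := String.ofList ((s.toList.map pvCompl).reverse)

-- generate(idx, remaining_d) of A, structural on the suffix pattern[idx:]
def pvGen (chars : List Char) (r : Int) : List String :=
  match chars with
  | [] => [""]
  | c :: rest =>
      (pvGen rest r).map (fun s => String.ofList (c :: s.toList)) ++
      (if r > 0 then
        ['A', 'C', 'G', 'T'].flatMap (fun b =>
          if b = c then [] else (pvGen rest (r - 1)).map (fun s => String.ofList (b :: s.toList)))
      else [])

def pvNeighborhood (pattern : String) (d : Int) : List String :=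
  PySem.Set.ofList (pvGen pattern.toList d)

-- the body of A's step-3 loop over sorted(mismatch_scores), state = (grouped, seen)
def pvStepA (S : PySem.Dict String Int)
    (st : List (String × Int × Int × Int) × PySem.Set String) (pattern : String) :
    List (String × Int × Int × Int) × PySem.Set String :=
  if pattern ∈ st.2 then st
  else
    let rc := pvRC pattern
    let score_fwd := S.getD pattern 0
    let score_rev := S.getD rc 0
    let total := if pattern = rc then score_fwd else score_fwd + score_rev
    let canonical := if rc < pattern then rc else pattern
    let entry := if canonical = pattern then (canonical, total, score_fwd, score_rev)
                 else (canonical, total, score_rev, score_fwd)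
    (st.1 ++ [entry], PySem.Set.add (PySem.Set.add st.2 pattern) rc)

def frequent_patterns_with_mismatches (dna_seq : String) (k : Int) (d : Int) (n : Int) :
    List (String × Int × Int × Int) :=
  let cs := dna_seq.toList
  -- Step 1 — exact counts
  let exact_counts : PySem.Dict String Int :=
    (PySem.List.pyRange 0 ((cs.length : Int) - k + 1) 1).foldl
      (fun dct i =>
        let kmer := String.ofList (PySem.List.slice cs (some i) (some (i + k)))
        dct.insert kmer (dct.getD kmer 0 + 1))
      PySem.Dict.empty
  -- Step 2 — propagate to neighbors
  let mismatch_scores : PySem.Dict String Int :=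
    exact_counts.items.foldl
      (fun dct p => (pvNeighborhood p.1 d).foldl
        (fun dct2 nb => dct2.insert nb (dct2.getD nb 0 + p.2)) dct)
      PySem.Dict.empty
  -- Step 3 — group by RC pair
  let st := (PySem.List.sorted mismatch_scores.keys (fun x => x) false).foldl
      (pvStepA mismatch_scores) ([], PySem.Set.empty)
  PySem.List.slice (PySem.List.sorted st.1 (fun t => t.2.1) true) none (some n)

-- ===== PORT B =====
-- one level of B's DP: from the rows of suffix s to the rows of ch + s
def pvRowStep (cap : Nat) (rows : List (List String)) (ch : Char) : List (List String) :=
  (List.range (cap + 1)).map (fun r =>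
    (rows.getD r []).map (fun s => String.ofList (ch :: s.toList)) ++
    (if r > 0 then
      ['A', 'C', 'G', 'T'].flatMap (fun b =>
        if b = ch then [] else (rows.getD (r - 1) []).map (fun s => String.ofList (b :: s.toList)))
    else []))

def pvNeighborsDP (pattern : String) (d : Int) : List String :=
  let cs := pattern.toList
  let cap : Nat := min (max d 0).toNat cs.length
  let rows := cs.reverse.foldl (pvRowStep cap) (List.replicate (cap + 1) [""])
  PySem.Set.ofList (rows.getD cap [])

-- B's per-pattern entry and keep-condition (the comprehension's body and filter)
def pvEntry (S : PySem.Dict String Int) (p : String) : String × Int × Int × Int :=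
  let r := pvRC p
  let f := S.getD p 0
  let g := S.getD r 0
  let total := if p = r then f else f + g
  if p ≤ r then (p, total, f, g) else (r, total, g, f)

def pvKeep (S : PySem.Dict String Int) (p : String) : Bool :=
  !(S.contains (pvRC p) && decide (pvRC p < p))

def frequent_patterns_with_mismatches_alt (dna_seq : String) (k : Int) (d : Int) (n : Int) :
    List (String × Int × Int × Int) :=
  if k < 1 then [] else
  let cs := dna_seq.toList
  let kmers := (PySem.List.pyRange 0 ((cs.length : Int) - k + 1) 1).map
      (fun i => String.ofList (PySem.List.slice cs (some i) (some (i + k))))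
  let counts : PySem.Dict String Int :=
    kmers.foldl (fun dct km => dct.insert km (dct.getD km 0 + 1)) PySem.Dict.empty
  let scores : PySem.Dict String Int :=
    counts.items.foldl
      (fun dct p => (pvNeighborsDP p.1 d).foldl
        (fun dct2 nb => dct2.insert nb (dct2.getD nb 0 + p.2)) dct)
      PySem.Dict.empty
  let entries := ((PySem.List.sorted scores.keys (fun x => x) false).filter (pvKeep scores)).map
      (pvEntry scores)
  PySem.List.slice (PySem.List.sorted entries (fun t => t.2.1) true) none (some n)

-- ===== PRECONDITION & SPEC =====
-- Pre_ excludes k < 1: there Python's slice dna_seq[i:i+k] wraps around via negative stop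
-- indices, so A counts accidental variable-length substrings (an artefact of Python slicing,
-- outside the task's natural domain of positive k-mer length); B returns [] there.
def Pre_frequent_patterns_with_mismatches (dna_seq : String) (k : Int) (d : Int) (n : Int) : Prop := 1 ≤ k
instance (dna_seq : String) (k : Int) (d : Int) (n : Int) : Decidable (Pre_frequent_patterns_with_mismatches dna_seq k d n) := by unfold Pre_frequent_patterns_with_mismatches; infer_instance
def pvWitness_frequent_patterns_with_mismatches : String × Int × Int × Int := ("ACGTA", 2, 1, 3)

def Spec_frequent_patterns_with_mismatches (dna_seq : String) (k : Int) (d : Int) (n : Int) (out : List (String × Int × Int × Int)) : Prop := out = frequent_patterns_with_mismatches_alt dna_seq k d n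
instance (dna_seq : String) (k : Int) (d : Int) (n : Int) (out : List (String × Int × Int × Int)) : Decidable (Spec_frequent_patterns_with_mismatches dna_seq k d n out) := by unfold Spec_frequent_patterns_with_mismatches; infer_instance

-- ===== CLAIM (what is proved, stated in full; the proofs are below) =====
def Claim_equal_frequent_patterns_with_mismatches : Prop := ∀ (dna_seq : String) (k : Int) (d : Int) (n : Int), Dom_frequent_patterns_with_mismatches dna_seq k d n → Pre_frequent_patterns_with_mismatches dna_seq k d n → Spec_frequent_patterns_with_mismatches dna_seq k d n (frequent_patterns_with_mismatches dna_seq k d n)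

-- ===== LEMMAS AND PROOFS =====

theorem pvCompl_invol (c : Char) : pvCompl (pvCompl c) = c := by
  simp only [pvCompl]; split_ifs <;> simp_all

theorem pvRC_invol (s : String) : pvRC (pvRC s) = s := by
  simp only [pvRC, String.toList_ofList, List.map_reverse, List.reverse_reverse,
    List.map_map]
  have : pvCompl ∘ pvCompl = id := funext pvCompl_invol
  simp [this, String.ofList_toList]

-- the recursion only sees remaining_d clamped to [0, length]
theorem pvGen_congr (chars : List Char) : ∀ (r e : Int),
    min (max r 0) (chars.length : Int) = min (max e 0) (chars.length : Int) →
    pvGen chars r = pvGen chars e := by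
  induction chars with
  | nil => intro r e _; rfl
  | cons c rest ih =>
    intro r e h
    simp only [List.length_cons] at h
    push_cast at h
    simp only [pvGen]
    have hk : pvGen rest r = pvGen rest e := ih r e (by omega)
    have hg : (r > 0) ↔ (e > 0) := by omega
    by_cases hr : r > 0
    · have he : e > 0 := hg.mp hr
      have hs : pvGen rest (r - 1) = pvGen rest (e - 1) := ih _ _ (by omega)
      rw [hk, hs, if_pos hr, if_pos he]
    · rw [hk, if_neg hr, if_neg (hg.not.mp hr)]

-- the DP rows compute exactly A's generate
theorem pvRows_getD (cs : List Char) (cap : Nat) : ∀ r : Nat, r ≤ cap →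
    ((cs.reverse.foldl (pvRowStep cap) (List.replicate (cap + 1) [""])).getD r [])
      = pvGen cs (r : Int) := by
  induction cs with
  | nil =>
    intro r hr
    simp [Nat.lt_succ_of_le hr, pvGen]
  | cons c rest ih =>
    intro r hr
    have hfold : (c :: rest).reverse.foldl (pvRowStep cap) (List.replicate (cap + 1) [""])
        = pvRowStep cap (rest.reverse.foldl (pvRowStep cap) (List.replicate (cap + 1) [""])) c := by
      rw [List.reverse_cons, List.foldl_append]
      rfl
    rw [hfold]
    have hlt : r < cap + 1 := Nat.lt_succ_of_le hr
    have hget : ∀ (f : Nat → List String),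
        (((List.range (cap + 1)).map f).getD r []) = f r := by
      intro f
      simp [List.getD, hlt]
    simp only [pvRowStep, hget]
    rw [ih r hr]
    match r with
    | 0 => simp [pvGen]
    | m + 1 =>
      simp only [Nat.add_sub_cancel]
      rw [ih m (by omega)]
      simp only [pvGen]
      have h1 : ((m + 1 : Nat) : Int) > 0 := by omega
      have h2 : ((m + 1 : Nat) : Int) - 1 = (m : Int) := by omega
      rw [if_pos (by omega : m + 1 > 0), if_pos h1, h2]

theorem pvNeighborsDP_eq (p : String) (d : Int) : pvNeighborsDP p d = pvNeighborhood p d := by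
  simp only [pvNeighborsDP, pvNeighborhood]
  set cs := p.toList
  set cap : Nat := min (max d 0).toNat cs.length with hcap
  rw [pvRows_getD cs cap cap (le_refl _)]
  rw [pvGen_congr cs (cap : Int) d (by omega)]

-- the scores dict (a nested insert loop from empty) has nodup keys
theorem pvNodupScores (g : String × Int → List String) :
    ∀ (l : List (String × Int)) (dct : PySem.Dict String Int), dct.keys.Nodup →
    (l.foldl (fun dd p => (g p).foldl
        (fun d2 nb => d2.insert nb (d2.getD nb 0 + p.2)) dd) dct).keys.Nodup := by
  intro l
  induction l with
  | nil => intro dct h; exact h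
  | cons p rest ih =>
    intro dct h
    exact ih _ (PySem.Dict.nodup_keys_foldl_insert (g p)
      (fun d2 nb => d2.getD nb 0 + p.2) dct h)

-- A's per-pattern entry equals B's
theorem pvEntry_eq (S : PySem.Dict String Int) (p : String) :
    (let rc := pvRC p
     let score_fwd := S.getD p 0
     let score_rev := S.getD rc 0
     let total := if p = rc then score_fwd else score_fwd + score_rev
     let canonical := if rc < p then rc else p
     if canonical = p then (canonical, total, score_fwd, score_rev)
     else (canonical, total, score_rev, score_fwd))
    = pvEntry S p := by
  simp only [pvEntry]
  by_cases h : pvRC p < p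
  · have hne : pvRC p ≠ p := ne_of_lt h
    have hle : ¬ (p ≤ pvRC p) := not_le_of_gt h
    simp [h, hne, hle]
  · have hle : p ≤ pvRC p := le_of_not_gt h
    simp [h, hle]

-- A's step-3 fold with a 'seen' set equals B's filter+map, over any strictly sorted key list
theorem pvStep3 (S : PySem.Dict String Int) :
    ∀ (rest : List String) (acc : List (String × Int × Int × Int)) (seen : PySem.Set String),
    rest.Pairwise (· < ·) →
    (∀ p ∈ rest, S.contains p = true) →
    (∀ q ∈ rest, (q ∈ seen ↔ (pvKeep S q = false ∧ pvRC q ∉ rest))) →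
    (rest.foldl (pvStepA S) (acc, seen)).1
      = acc ++ (rest.filter (pvKeep S)).map (pvEntry S) := by
  intro rest
  induction rest with
  | nil => intro acc seen _ _ _; simp
  | cons p rest' ih =>
    intro acc seen hpw h0 h2
    have hpw' : rest'.Pairwise (· < ·) := (List.pairwise_cons.mp hpw).2
    have hplt : ∀ q ∈ rest', p < q := (List.pairwise_cons.mp hpw).1
    have hmem : p ∈ seen ↔ pvKeep S p = false := by
      rw [h2 p (List.mem_cons_self)]
      constructor
      · exact fun h => h.1
      · intro hk
        refine ⟨hk, ?_⟩
        have hlt : pvRC p < p := by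
          simp only [pvKeep, Bool.not_eq_false', Bool.and_eq_true, decide_eq_true_eq] at hk
          exact hk.2
        intro hin
        rcases List.mem_cons.mp hin with h | h
        · rw [h] at hlt; exact lt_irrefl p hlt
        · exact absurd (lt_trans hlt (hplt _ h)) (lt_irrefl _)
    simp only [List.foldl_cons]
    by_cases hk : pvKeep S p = false
    · -- A skips p; B filters it out
      have hseen : p ∈ seen := hmem.mpr hk
      simp only [pvStepA, if_pos hseen]
      have hrc : pvRC p < p := by
        simp only [pvKeep, Bool.not_eq_false', Bool.and_eq_true, decide_eq_true_eq] at hk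
        exact hk.2
      rw [ih acc seen hpw' (fun q hq => h0 q (List.mem_cons_of_mem _ hq)) ?_]
      · simp [hk]
      · intro q hq
        rw [h2 q (List.mem_cons_of_mem _ hq)]
        constructor
        · rintro ⟨hkq, hnq⟩
          exact ⟨hkq, fun hin => hnq (List.mem_cons_of_mem _ hin)⟩
        · rintro ⟨hkq, hnq⟩
          refine ⟨hkq, ?_⟩
          intro hin
          rcases List.mem_cons.mp hin with h | h
          · -- pvRC q = p impossible: pvKeep S q false gives pvRC q < q, but q ∈ rest' gives p < q;
            -- then q = pvRC p with pvRC p < p from... derive contradiction via involution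
            have hq1 : pvRC q < q := by
              simp only [pvKeep, Bool.not_eq_false', Bool.and_eq_true, decide_eq_true_eq] at hkq
              exact hkq.2
            have : q = pvRC p := by rw [← h, pvRC_invol]
            have h3 : pvRC p < p := hrc
            have h4 : p < q := hplt q hq
            rw [this] at h4
            exact absurd (lt_trans h4 h3) (lt_irrefl _)
          · exact hnq h
    · -- A processes p; B keeps it
      have hseen : p ∉ seen := fun h => hk (hmem.mp h)
      have hkeep : pvKeep S p = true := by
        cases h : pvKeep S p
        · exact absurd h hk
        · rfl
      simp only [pvStepA, if_neg hseen]
      rw [ih _ _ hpw' (fun q hq => h0 q (List.mem_cons_of_mem _ hq)) ?_]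
      · rw [List.filter_cons, if_pos hkeep]
        simp only [List.map_cons, List.append_assoc, List.singleton_append]
        rw [pvEntry_eq S p]
      · intro q hq
        have hpq : p < q := hplt q hq
        constructor
        · intro hin
          rcases (PySem.Set.mem_add _ _ _).mp hin with hin | hin
          · rcases (PySem.Set.mem_add _ _ _).mp hin with hin | hin
            · -- q ∈ seen
              rcases (h2 q (List.mem_cons_of_mem _ hq)).mp hin with ⟨hkq, hnq⟩
              exact ⟨hkq, fun h => hnq (List.mem_cons_of_mem _ h)⟩
            · -- q = p, impossible
              rw [hin] at hpq; exact absurd hpq (lt_irrefl p)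
          · -- q = pvRC p
            have hrcq : pvRC q = p := by rw [hin, pvRC_invol]
            have hcont : S.contains (pvRC q) = true := by
              rw [hrcq]; exact h0 p List.mem_cons_self
            have hlt : pvRC q < q := by rw [hrcq]; exact hpq
            refine ⟨?_, ?_⟩
            · simp [pvKeep, hcont, hlt]
            · rw [hrcq]
              intro hin2
              exact absurd (hplt p hin2) (lt_irrefl _)
        · rintro ⟨hkq, hnq⟩
          by_cases hcase : pvRC q = p
          · -- then q = pvRC p, in seen'
            have : q = pvRC p := by rw [← hcase, pvRC_invol]
            exact (PySem.Set.mem_add _ _ _).mpr (Or.inr this)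
          · have : q ∈ seen := by
              rw [h2 q (List.mem_cons_of_mem _ hq)]
              refine ⟨hkq, ?_⟩
              intro hin
              rcases List.mem_cons.mp hin with h | h
              · exact hcase h
              · exact hnq h
            exact (PySem.Set.mem_add _ _ _).mpr
              (Or.inl ((PySem.Set.mem_add _ _ _).mpr (Or.inl this)))

-- strict sortedness of sorted(keys) for a nodup key list
theorem pvSortedLt (xs : List String) (h : xs.Nodup) :
    (PySem.List.sorted xs (fun x => x) false).Pairwise (· < ·) := by
  have hle := PySem.List.sorted_pairwise xs (fun x => x)
  have hnd : (PySem.List.sorted xs (fun x => x) false).Nodup :=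
    ((PySem.List.sorted_perm xs (fun x => x) false).nodup_iff).mpr h
  exact (hle.and hnd).imp (fun ⟨h1, h2⟩ => lt_of_le_of_ne h1 h2)

-- ===== VERDICT (by name: the statement is the Claim_ definition above) =====
theorem frequent_patterns_with_mismatches_spec : Claim_equal_frequent_patterns_with_mismatches := by
  intro dna_seq k d n _ hpre
  unfold Spec_frequent_patterns_with_mismatches
  unfold frequent_patterns_with_mismatches frequent_patterns_with_mismatches_alt
  rw [if_neg (by exact not_lt.mpr hpre)]
  simp only [pvNeighborsDP_eq, List.foldl_map]
  set cs := dna_seq.toList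
  set S : PySem.Dict String Int :=
    ((PySem.List.pyRange 0 ((cs.length : Int) - k + 1) 1).foldl
      (fun dct i =>
        let kmer := String.ofList (PySem.List.slice cs (some i) (some (i + k)))
        dct.insert kmer (dct.getD kmer 0 + 1))
      PySem.Dict.empty).items.foldl
      (fun dct p => (pvNeighborhood p.1 d).foldl
        (fun dct2 nb => dct2.insert nb (dct2.getD nb 0 + p.2)) dct)
      PySem.Dict.empty with hS
  have hnodup : S.keys.Nodup := by
    rw [hS]
    exact pvNodupScores (fun p => pvNeighborhood p.1 d) _ _ (by simp [PySem.Dict.keys_empty])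
  set ks := PySem.List.sorted S.keys (fun x => x) false with hks
  have hmain : (ks.foldl (pvStepA S) ([], PySem.Set.empty)).1
      = [] ++ (ks.filter (pvKeep S)).map (pvEntry S) := by
    apply pvStep3 S ks [] PySem.Set.empty (pvSortedLt S.keys hnodup)
    · intro p hp
      rw [PySem.Dict.contains_iff_mem_keys]
      exact (PySem.List.mem_sorted _ _ _ _).mp hp
    · intro q hq
      constructor
      · intro h; exact absurd h (List.not_mem_nil)
      · rintro ⟨hkq, hnq⟩
        exfalso
        apply hnq
        have hcont : S.contains (pvRC q) = true := by
          simp only [pvKeep, Bool.not_eq_false', Bool.and_eq_true, decide_eq_true_eq] at hkq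
          exact hkq.1
        rw [hks, PySem.List.mem_sorted]
        exact (PySem.Dict.contains_iff_mem_keys _ _).mp hcont
  rw [hmain]
  simp
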